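-- pv_equiv track=rewrite | github.com/Kyle0923/cpp-class-parser | class_parser.py | find_descendants
-- ===== SOURCE A (Python) =====
-- def find_descendants(parent_dict: dict):
--     child_dict = {}
--     for derived, bases in parent_dict.items():
--         if derived not in child_dict:
--             child_dict[derived] = []
--         for base in bases:
--             if base not in child_dict:
--                 child_dict[base] = []
--             child_dict[base].append(derived)
--     return child_dict
-- ===== SOURCE B (Python) =====
-- def find_descendants(parent_dict: dict):
--     order = dict.fromkeys(k for derived, bases in parent_dict.items()
--                           for k in (derived, *bases))
--     return {node: [derived for derived, bases in parent_dict.items()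
--                    for base in bases if base == node]
--             for node in order}
-- ===== Notes on version B (the rewrite author's own statement) =====
-- stated objective: alternative
-- what changed: A scatters: one interleaved mutating pass that lazily creates dict entries with 'if not in' guards and appends each derived into them; B gathers: it fixes the node order once, then builds each node's children list independently by a comprehension scanning parent_dict for occurrences of that node among the bases (column-wise construction, no mutation, no guards).
import Mathlib
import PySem

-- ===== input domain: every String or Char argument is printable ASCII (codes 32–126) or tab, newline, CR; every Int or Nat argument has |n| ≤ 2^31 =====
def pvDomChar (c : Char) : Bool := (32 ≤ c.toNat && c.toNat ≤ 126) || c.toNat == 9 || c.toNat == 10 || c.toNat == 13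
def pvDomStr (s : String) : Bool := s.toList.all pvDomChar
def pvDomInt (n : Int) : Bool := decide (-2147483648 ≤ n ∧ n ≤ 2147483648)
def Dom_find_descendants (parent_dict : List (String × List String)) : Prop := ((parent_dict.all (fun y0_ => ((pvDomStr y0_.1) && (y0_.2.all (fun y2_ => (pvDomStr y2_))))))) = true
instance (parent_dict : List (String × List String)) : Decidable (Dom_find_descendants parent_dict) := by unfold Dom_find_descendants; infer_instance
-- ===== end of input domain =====

-- B replaces A's single mutating scatter pass (lazy key creation + appends) by a gather:
-- fix the node order once, then build each node's children list by scanning parent_dict;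
-- objective: alternative algorithm (column-wise gather instead of row-wise scatter).

-- ===== PORT A =====
-- 'k in child_dict' on the assoc-list dict representation (unique keys by construction)
def pvContains (d : List (String × List String)) (k : String) : Bool :=
  d.any (fun p => p.1 == k)

-- 'if k not in child_dict: child_dict[k] = []'
def pvAddKey (d : List (String × List String)) (k : String) : List (String × List String) :=
  if pvContains d k then d else d ++ [(k, [])]

-- 'child_dict[k].append(v)' (keys are unique, so exactly one entry matches)
def pvPush (d : List (String × List String)) (k : String) (v : String) : List (String × List String) :=
  d.map (fun p => if p.1 == k then (p.1, p.2 ++ [v]) else p)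

def find_descendants (parent_dict : List (String × List String)) : List (String × List String) :=
  parent_dict.foldl
    (fun d it => it.2.foldl (fun d b => pvPush (pvAddKey d b) b it.1) (pvAddKey d it.1))
    []

-- ===== PORT B =====
-- the inner comprehension: [derived for derived, bases in parent_dict for base in bases if base == node]
def pvGather (parent_dict : List (String × List String)) (node : String) : List String :=
  parent_dict.flatMap (fun it => (it.2.filter (fun b => b == node)).map (fun _ => it.1))

def find_descendants_alt (parent_dict : List (String × List String)) : List (String × List String) :=
  -- order = dict.fromkeys(k for derived, bases in parent_dict.items() for k in (derived, *bases))
  let order := PySem.List.dedup (parent_dict.flatMap (fun it => it.1 :: it.2))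
  -- {node: [derived for derived, bases in parent_dict.items() for base in bases if base == node] for node in order}
  order.map (fun node => (node, pvGather parent_dict node))

-- ===== PRECONDITION & SPEC =====
def Spec_find_descendants (parent_dict : List (String × List String)) (out : List (String × List String)) : Prop := out = find_descendants_alt parent_dict
instance (parent_dict : List (String × List String)) (out : List (String × List String)) : Decidable (Spec_find_descendants parent_dict out) := by unfold Spec_find_descendants; infer_instance

-- ===== CLAIM (what is proved, stated in full; the proofs are below) =====
def Claim_equal_find_descendants : Prop := ∀ (parent_dict : List (String × List String)), Dom_find_descendants parent_dict → Spec_find_descendants parent_dict (find_descendants parent_dict)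

-- ===== LEMMAS AND PROOFS =====

theorem pvAny_beq_eq_decide_mem (s : List String) (k : String) :
    (s.any fun x => x == k) = decide (k ∈ s) := by
  induction s with
  | nil => rfl
  | cons a s ih =>
      simp only [List.any_cons, ih, List.mem_cons]
      by_cases h : k = a
      · subst h; simp
      · rw [beq_eq_false_iff_ne.mpr (Ne.symm h)]; simp [h]

theorem pvContains_eq_keys (d : List (String × List String)) (k : String) :
    pvContains d k = (d.map (·.1)).any (· == k) := by
  simp [pvContains, List.any_map, Function.comp_def]

theorem pvContains_iff (d : List (String × List String)) (k : String) :
    pvContains d k = true ↔ k ∈ d.map (·.1) := by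
  rw [pvContains_eq_keys]
  simp

theorem keys_pvPush (d : List (String × List String)) (k v : String) :
    (pvPush d k v).map (·.1) = d.map (·.1) := by
  simp only [pvPush, List.map_map]
  apply List.map_congr_left
  intro p _
  by_cases h : p.1 = k <;> simp [h]

theorem keys_pvAddKey_sub (d : List (String × List String)) (k k' : String)
    (h : k' ∈ d.map (·.1)) : k' ∈ (pvAddKey d k).map (·.1) := by
  unfold pvAddKey
  split <;> simp_all

theorem mem_keys_pvAddKey (d : List (String × List String)) (k : String) :
    k ∈ (pvAddKey d k).map (·.1) := by
  unfold pvAddKey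
  split
  · exact (pvContains_iff d k).mp (by assumption)
  · simp

-- pushing to a present key commutes with adding a (possibly new) key
theorem pvAddKey_pvPush_comm (d : List (String × List String)) (b v k : String)
    (hb : b ∈ d.map (·.1)) :
    pvAddKey (pvPush d b v) k = pvPush (pvAddKey d k) b v := by
  have hc : pvContains (pvPush d b v) k = pvContains d k := by
    rw [pvContains_eq_keys, pvContains_eq_keys, keys_pvPush]
  unfold pvAddKey
  rw [hc]
  cases h : pvContains d k with
  | true => simp
  | false =>
      have hkb : ¬ k = b := by
        intro he; subst he
        exact absurd ((pvContains_iff d k).mpr hb) (by simp [h])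
      simp [pvPush, hkb]

theorem foldl_addKey_pvPush_comm (ks : List String) (d : List (String × List String)) (b v : String)
    (hb : b ∈ d.map (·.1)) :
    ks.foldl pvAddKey (pvPush d b v) = pvPush (ks.foldl pvAddKey d) b v := by
  induction ks generalizing d with
  | nil => rfl
  | cons k ks ih =>
      simp only [List.foldl_cons]
      rw [pvAddKey_pvPush_comm d b v k hb]
      exact ih (pvAddKey d k) (keys_pvAddKey_sub d k b hb)

-- A's inner loop = add all base keys first, then do the guard-free pushes
theorem inner_split (bases : List String) (d : List (String × List String)) (v : String) :
    bases.foldl (fun d b => pvPush (pvAddKey d b) b v) d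
      = bases.foldl (fun d b => pvPush d b v) (bases.foldl pvAddKey d) := by
  induction bases generalizing d with
  | nil => rfl
  | cons b bs ih =>
      simp only [List.foldl_cons]
      rw [ih (pvPush (pvAddKey d b) b v),
          foldl_addKey_pvPush_comm bs (pvAddKey d b) b v (mem_keys_pvAddKey d b)]

theorem foldl_addKey_foldl_push_comm (ks bases : List String) (d : List (String × List String)) (v : String)
    (hsub : ∀ b ∈ bases, b ∈ d.map (·.1)) :
    ks.foldl pvAddKey (bases.foldl (fun d b => pvPush d b v) d)
      = bases.foldl (fun d b => pvPush d b v) (ks.foldl pvAddKey d) := by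
  induction bases generalizing d with
  | nil => rfl
  | cons b bs ih =>
      simp only [List.foldl_cons]
      rw [ih (pvPush d b v)
            (fun b' hb' => by rw [keys_pvPush]; exact hsub b' (List.mem_cons_of_mem b hb')),
          foldl_addKey_pvPush_comm ks d b v (hsub b (List.mem_cons_self ..))]

theorem mem_foldl_addKey (ks : List String) (d : List (String × List String)) (b : String)
    (hb : b ∈ ks ∨ b ∈ d.map (·.1)) : b ∈ (ks.foldl pvAddKey d).map (·.1) := by
  induction ks generalizing d with
  | nil => simpa using hb
  | cons k ks ih =>
      simp only [List.foldl_cons]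
      rcases hb with hb | hb
      · rcases List.mem_cons.mp hb with rfl | hb
        · exact ih (pvAddKey d b) (Or.inr (mem_keys_pvAddKey d b))
        · exact ih (pvAddKey d k) (Or.inl hb)
      · exact ih (pvAddKey d k) (Or.inr (keys_pvAddKey_sub d k b hb))

-- A = populate after adding all keys in first-occurrence order
theorem main_split (pd : List (String × List String)) (d : List (String × List String)) :
    pd.foldl (fun d it => it.2.foldl (fun d b => pvPush (pvAddKey d b) b it.1) (pvAddKey d it.1)) d
      = pd.foldl (fun d it => it.2.foldl (fun d b => pvPush d b it.1) d)
          ((pd.flatMap (fun it => it.1 :: it.2)).foldl pvAddKey d) := by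
  induction pd generalizing d with
  | nil => rfl
  | cons it rest ih =>
      simp only [List.foldl_cons, List.flatMap_cons]
      rw [inner_split it.2 (pvAddKey d it.1) it.1, ih]
      have h1 : (it.1 :: it.2 ++ rest.flatMap (fun it => it.1 :: it.2)).foldl pvAddKey d
          = (rest.flatMap (fun it => it.1 :: it.2)).foldl pvAddKey (it.2.foldl pvAddKey (pvAddKey d it.1)) := by
        simp [List.foldl_append]
      rw [h1, foldl_addKey_foldl_push_comm _ it.2 _ it.1
            (fun b hb => mem_foldl_addKey it.2 (pvAddKey d it.1) b (Or.inl hb))]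

-- running the addKey fold on a dict of empty lists = ordered-set dedup of the keys, mapped to ([])
theorem pvAddKey_map_set (s : List String) (k : String) :
    pvAddKey (s.map (fun k => (k, ([] : List String)))) k
      = (PySem.Set.add s k).map (fun k => (k, ([] : List String))) := by
  have hc : pvContains (s.map (fun k => (k, ([] : List String)))) k = PySem.Set.contains s k := by
    simp [pvContains, List.any_map, Function.comp_def, PySem.Set.contains, pvAny_beq_eq_decide_mem]
  unfold pvAddKey PySem.Set.add
  rw [hc]
  cases h : PySem.Set.contains s k with
  | true => simp
  | false => simp [List.map_append]

theorem foldl_addKey_eq_dedup (ks : List String) (s : List String) :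
    ks.foldl pvAddKey (s.map (fun k => (k, ([] : List String))))
      = (PySem.Set.update s ks).map (fun k => (k, ([] : List String))) := by
  induction ks generalizing s with
  | nil => simp [PySem.Set.update]
  | cons k ks ih =>
      simp only [List.foldl_cons, PySem.Set.update_cons, pvAddKey_map_set]
      exact ih (PySem.Set.add s k)

-- one guard-free populate sweep, written as a per-entry map
theorem push_fold_map (bases : List String) (d : List (String × List String)) (v : String) :
    bases.foldl (fun d b => pvPush d b v) d
      = d.map (fun p => (p.1, p.2 ++ (bases.filter (fun b => b == p.1)).map (fun _ => v))) := by
  induction bases generalizing d with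
  | nil => simp
  | cons b bs ih =>
      rw [List.foldl_cons, ih]
      simp only [pvPush, List.map_map]
      apply List.map_congr_left
      intro p _
      by_cases h : p.1 = b
      · simp [h, List.append_assoc]
      · have hb : ¬ b = p.1 := fun he => h he.symm
        simp [h, hb]

-- the whole populate phase gathers, entry by entry
theorem populate_eq_gather (pd : List (String × List String)) (d : List (String × List String)) :
    pd.foldl (fun d it => it.2.foldl (fun d b => pvPush d b it.1) d) d
      = d.map (fun p => (p.1, p.2 ++ pvGather pd p.1)) := by
  induction pd generalizing d with
  | nil => simp [pvGather]
  | cons it rest ih =>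
      rw [List.foldl_cons, push_fold_map, ih]
      simp only [List.map_map]
      apply List.map_congr_left
      intro p _
      simp [pvGather, List.flatMap_cons, List.append_assoc]

-- ===== VERDICT (by name: the statement is the Claim_ definition above) =====
theorem find_descendants_spec : Claim_equal_find_descendants := by
  intro pd _
  show find_descendants pd = find_descendants_alt pd
  unfold find_descendants find_descendants_alt
  rw [main_split]
  have h0 : ([] : List (String × List String)) = ([] : List String).map (fun k => (k, ([] : List String))) := rfl
  rw [h0, foldl_addKey_eq_dedup, populate_eq_gather]
  simp only [List.map_map, PySem.List.dedup_eq_ofList, ← PySem.Set.update_nil_left]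
  rfl
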